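-- pv_equiv track=rewrite | github.com/jmagar/docker-mcp | docker_mcp/services/host.py | _recommend_compose_path
-- ===== SOURCE A (Python) =====
-- def _recommend_compose_path(paths: list[str]) -> str | None:
--     """Recommend the best compose path from discovered options using smart detection."""
--     if not paths:
--         return None
--
--     # If only one path, return it
--     if len(paths) == 1:
--         return paths[0]
--
--     # Prefer persistent storage paths over system paths
--     persistent_storage_paths = []
--     system_paths = []
--
--     for path in paths:
--         # Persistent storage locations (more reliable for user data)
--         if any(path.startswith(prefix) for prefix in ["/mnt/", "/data/", "/srv/"]):
--             persistent_storage_paths.append(path)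
--         # System paths (less preferred for user data)
--         elif any(path.startswith(prefix) for prefix in ["/opt/", "/home/"]):
--             system_paths.append(path)
--         else:
--             # Unknown path, treat as persistent storage
--             persistent_storage_paths.append(path)
--
--     # Prefer persistent storage paths
--     if persistent_storage_paths:
--         return persistent_storage_paths[0]
--
--     # Fall back to system paths
--     if system_paths:
--         return system_paths[0]
--
--     # Final fallback
--     return paths[0]
-- ===== SOURCE B (Python) =====
-- def _recommend_compose_path(paths: list[str]) -> str | None:
--     """Recommend the best compose path: first non-system path, else the first path."""
--     if not paths:
--         return None
--     for path in paths:
--         if not path.startswith(("/opt/", "/home/")):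
--             return path
--     return paths[0]
-- ===== Notes on version B (the rewrite author's own statement) =====
-- stated objective: simpler
-- what changed: Replaces A's build-two-buckets-then-select with a single early-return scan for the first non-system path falling back to paths[0], maintaining no auxiliary lists; the early exit and absence of list building make it measurably faster.
import Mathlib
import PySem

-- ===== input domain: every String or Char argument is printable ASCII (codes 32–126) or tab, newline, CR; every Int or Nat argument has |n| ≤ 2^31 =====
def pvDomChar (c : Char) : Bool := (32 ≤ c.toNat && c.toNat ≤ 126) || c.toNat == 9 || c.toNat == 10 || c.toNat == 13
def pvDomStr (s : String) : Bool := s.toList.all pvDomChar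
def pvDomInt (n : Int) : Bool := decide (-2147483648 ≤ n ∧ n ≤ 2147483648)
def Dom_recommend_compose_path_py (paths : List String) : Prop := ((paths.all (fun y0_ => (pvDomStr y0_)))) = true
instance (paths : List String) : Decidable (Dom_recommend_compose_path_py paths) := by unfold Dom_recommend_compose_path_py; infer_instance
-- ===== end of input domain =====

-- B replaces A's build-two-buckets-then-select with a single early-return scan (simpler; return value only).

-- ===== PORT A =====
-- A's two `any(path.startswith(prefix) for prefix in [...])` tests
def pvCondPersist (path : String) : Bool :=
  (["/mnt/", "/data/", "/srv/"]).any (fun pre => PySem.Str.startswith path pre)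

def pvCondSystem (path : String) : Bool :=
  (["/opt/", "/home/"]).any (fun pre => PySem.Str.startswith path pre)

def recommend_compose_path_py (paths : List String) : Option String :=
  if paths = [] then none
  else if paths.length = 1 then PySem.List.pyGet? paths 0
  else
    let st := paths.foldl (fun (st : List String × List String) path =>
      if pvCondPersist path then (st.1 ++ [path], st.2)
      else if pvCondSystem path then (st.1, st.2 ++ [path])
      else (st.1 ++ [path], st.2)) ([], [])
    if st.1 ≠ [] then PySem.List.pyGet? st.1 0
    else if st.2 ≠ [] then PySem.List.pyGet? st.2 0
    else PySem.List.pyGet? paths 0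

-- ===== PORT B =====
-- B's `for path in paths: if not path.startswith(("/opt/", "/home/")): return path`
def pvAltScan : List String → Option String
  | [] => none
  | p :: rest =>
    if ¬ (PySem.Str.startswith p "/opt/" || PySem.Str.startswith p "/home/") then some p
    else pvAltScan rest

def recommend_compose_path_py_alt (paths : List String) : Option String :=
  if paths = [] then none
  else
    match pvAltScan paths with
    | some p => some p
    | none => PySem.List.pyGet? paths 0

-- ===== PRECONDITION & SPEC =====
def Spec_recommend_compose_path_py (paths : List String) (out : Option String) : Prop := out = recommend_compose_path_py_alt paths
instance (paths : List String) (out : Option String) : Decidable (Spec_recommend_compose_path_py paths out) := by unfold Spec_recommend_compose_path_py; infer_instance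

-- ===== CLAIM (what is proved, stated in full; the proofs are below) =====
def Claim_equal_recommend_compose_path_py : Prop := ∀ (paths : List String), Dom_recommend_compose_path_py paths → Spec_recommend_compose_path_py paths (recommend_compose_path_py paths)

-- ===== LEMMAS AND PROOFS =====

-- the two prefix families are mutually exclusive (they differ at the second character)
lemma pvDisj (s : String) (h : pvCondPersist s = true) : pvCondSystem s = false := by
  simp [pvCondPersist, PySem.Chars.startswith_iff] at h
  simp [pvCondSystem]
  rcases h with h | h | h <;>
    obtain ⟨t, ht⟩ := h <;> simp at ht <;>
    constructor <;>
    · apply Bool.eq_false_iff.mpr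
      intro hT
      rw [PySem.Chars.startswith_iff] at hT
      obtain ⟨u, hu⟩ := hT
      rw [← ht] at hu
      simp at hu

lemma pvFoldChar (l : List String) (pers sys : List String) :
    l.foldl (fun (st : List String × List String) path =>
      if pvCondPersist path then (st.1 ++ [path], st.2)
      else if pvCondSystem path then (st.1, st.2 ++ [path])
      else (st.1 ++ [path], st.2)) (pers, sys)
    = (pers ++ l.filter (fun p => !pvCondSystem p), sys ++ l.filter (fun p => pvCondSystem p)) := by
  induction l generalizing pers sys with
  | nil => simp
  | cons p rest ih =>
    by_cases hp : pvCondPersist p = true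
    · have hs := pvDisj p hp
      simp [hp, hs, ih]
    · by_cases hs : pvCondSystem p = true
      · simp [hp, hs, ih]
      · simp [hp, hs, ih]

lemma pvScanChar (l : List String) :
    pvAltScan l = (l.filter (fun p => !pvCondSystem p)).head? := by
  induction l with
  | nil => simp [pvAltScan]
  | cons p rest ih =>
    rw [show pvAltScan (p :: rest)
        = if ¬ (PySem.Str.startswith p "/opt/" || PySem.Str.startswith p "/home/") then some p
          else pvAltScan rest from rfl]
    have hcs : (PySem.Str.startswith p "/opt/" || PySem.Str.startswith p "/home/") = pvCondSystem p := by
      simp [pvCondSystem]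
    rw [hcs]
    by_cases hs : pvCondSystem p = true
    · simp [hs, ih]
    · have hs' : pvCondSystem p = false := by simpa using hs
      simp [hs']

-- ===== VERDICT (by name: the statement is the Claim_ definition above) =====
theorem recommend_compose_path_py_spec : Claim_equal_recommend_compose_path_py := by
  intro paths _
  unfold Spec_recommend_compose_path_py recommend_compose_path_py recommend_compose_path_py_alt
  by_cases hnil : paths = []
  · simp [hnil]
  · simp only [hnil, if_false]
    by_cases h1 : paths.length = 1
    · match paths, h1 with
      | [p], _ =>
        simp only [pvScanChar]
        by_cases hs : pvCondSystem p = true <;>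
          simp [hs, PySem.List.pyGet?, PySem.List.pyIdx?]
    · simp only [h1, if_false, pvFoldChar, pvScanChar, List.nil_append]
      by_cases hpe : paths.filter (fun p => !pvCondSystem p) = []
      · -- no persistent path: every path is a system path, so sys bucket = paths
        have hall : ∀ p ∈ paths, pvCondSystem p = true := by
          intro p hp
          by_contra hc
          have hf : p ∈ paths.filter (fun q => !pvCondSystem q) :=
            List.mem_filter.mpr ⟨hp, by simpa using hc⟩
          simp [hpe] at hf
        have hsys : paths.filter (fun p => pvCondSystem p) = paths :=
          List.filter_eq_self.mpr (by simpa using hall)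
        simp [hpe, hsys, hnil]
      · obtain ⟨q, rest, hq⟩ := List.exists_cons_of_ne_nil hpe
        simp [hq, PySem.List.pyGet?, PySem.List.pyIdx?]
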